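-- pv_equiv track=rewrite | github.com/rpsfilho93/chatbot-server | server.py | word_occurences
-- ===== SOURCE A (Python) =====
-- def word_occurences(sentence, corpus_word_freq):
--     corpus_occurences = []
--     for doc_freq in corpus_word_freq:
--         doc_occurences = 0
--         for word in sentence:
--             if(word in doc_freq):
--                 doc_occurences += doc_freq[word]
--
--         corpus_occurences.append(doc_occurences)
--     return corpus_occurences
-- ===== SOURCE B (Python) =====
-- def word_occurences(sentence, corpus_word_freq):
--     counts = {}
--     for w in sentence:
--         counts[w] = counts.get(w, 0) + 1
--     return [sum(c * doc_freq[w] for w, c in counts.items() if w in doc_freq)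
--             for doc_freq in corpus_word_freq]
-- ===== Notes on version B (the rewrite author's own statement) =====
-- stated objective: alternative
-- what changed: B aggregates the sentence once into a word->count map and then, per document, sums count * doc_freq[word] over the unique words, instead of rescanning every raw sentence token for every document.
import Mathlib
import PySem

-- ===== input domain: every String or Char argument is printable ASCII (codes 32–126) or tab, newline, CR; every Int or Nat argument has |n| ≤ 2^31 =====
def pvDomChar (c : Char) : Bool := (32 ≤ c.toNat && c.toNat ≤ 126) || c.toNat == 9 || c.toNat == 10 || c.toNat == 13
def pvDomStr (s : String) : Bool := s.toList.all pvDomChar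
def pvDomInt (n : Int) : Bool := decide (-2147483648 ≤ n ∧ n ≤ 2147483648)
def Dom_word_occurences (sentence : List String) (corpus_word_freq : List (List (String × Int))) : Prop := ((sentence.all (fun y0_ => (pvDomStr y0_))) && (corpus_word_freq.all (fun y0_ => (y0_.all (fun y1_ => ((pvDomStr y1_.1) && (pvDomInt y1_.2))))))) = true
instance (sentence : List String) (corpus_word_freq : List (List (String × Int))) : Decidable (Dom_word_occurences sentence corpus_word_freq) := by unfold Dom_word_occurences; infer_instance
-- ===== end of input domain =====

-- B aggregates the sentence once into a word->count map and sums per document over unique words (alternative decomposition, same result).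

-- ===== PORT A =====
-- each doc_freq is a Python dict; PySem.Dict.ofList rebuilds it (last value wins on duplicate pairs, like dict())
def word_occurences (sentence : List String) (corpus_word_freq : List (List (String × Int))) : List Int :=
  corpus_word_freq.foldl (fun corpus_occurences doc_freq =>
    let d := PySem.Dict.ofList doc_freq
    let doc_occurences := sentence.foldl (fun doc_occurences word =>
      if d.contains word then doc_occurences + d.getD word 0 else doc_occurences) 0
    corpus_occurences ++ [doc_occurences]) []

-- ===== PORT B =====
def word_occurences_alt (sentence : List String) (corpus_word_freq : List (List (String × Int))) : List Int :=
  let counts := sentence.foldl (fun d w => d.insert w (d.getD w 0 + 1)) PySem.Dict.empty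
  corpus_word_freq.map (fun doc_freq =>
    let d := PySem.Dict.ofList doc_freq
    counts.items.foldl (fun s p =>
      if d.contains p.1 then s + p.2 * d.getD p.1 0 else s) 0)

-- ===== PRECONDITION & SPEC =====
def Spec_word_occurences (sentence : List String) (corpus_word_freq : List (List (String × Int))) (out : List Int) : Prop := out = word_occurences_alt sentence corpus_word_freq
instance (sentence : List String) (corpus_word_freq : List (List (String × Int))) (out : List Int) : Decidable (Spec_word_occurences sentence corpus_word_freq out) := by unfold Spec_word_occurences; infer_instance

-- ===== CLAIM (what is proved, stated in full; the proofs are below) =====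
def Claim_equal_word_occurences : Prop := ∀ (sentence : List String) (corpus_word_freq : List (List (String × Int))), Dom_word_occurences sentence corpus_word_freq → Spec_word_occurences sentence corpus_word_freq (word_occurences sentence corpus_word_freq)

-- ===== LEMMAS AND PROOFS =====

-- a guarded accumulating fold is init + the sum of the guarded contributions
theorem foldl_if_add {α : Type} (c : α → Bool) (f : α → Int) :
    ∀ (l : List α) (init : Int),
      l.foldl (fun s x => if c x then s + f x else s) init
        = init + (l.map (fun x => if c x then f x else 0)).sum := by
  intro l
  induction l with
  | nil => simp
  | cons x t ih =>
      intro init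
      simp only [List.foldl_cons, List.map_cons, List.sum_cons, ih]
      by_cases h : c x = true <;> simp [h, add_assoc]

-- sum of g over a list = count-weighted sum of g over its distinct elements
theorem sum_over_set_counts (g : String → Int) :
    ∀ (n : Nat) (l : List String), l.length = n →
      (l.map g).sum = ((PySem.Set.ofList l).map (fun k => (l.count k : Int) * g k)).sum := by
  intro n
  induction n using Nat.strong_induction_on with
  | _ n ih =>
    intro l hl
    match l with
    | [] => simp [PySem.Set.ofList]
    | x :: t =>
      have hlen : t.length + 1 = n := by simpa using hl
      have hperm : List.Perm ((x :: t).filter (· == x) ++ (x :: t).filter (fun y => !(y == x))) (x :: t) :=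
        List.filter_append_perm _ _
      have hfilt : (x :: t).filter (fun y => !(y == x)) = t.filter (fun y => !(y == x)) := by
        simp
      have hLHS : ((x :: t).map g).sum
          = ((x :: t).count x : Int) * g x + ((t.filter (fun y => !(y == x))).map g).sum := by
        rw [← (hperm.map g).sum_eq, List.map_append, List.sum_append, hfilt]
        congr 1
        rw [List.filter_beq x, List.map_replicate, List.sum_replicate]
        simp
      have hxnot : x ∉ t.filter (fun y => !(y == x)) := by simp [List.mem_filter]
      have hnodup : (x :: PySem.Set.ofList (t.filter (fun y => !(y == x)))).Nodup := by
        refine List.nodup_cons.mpr ⟨?_, PySem.Set.nodup_ofList _⟩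
        intro hmem
        exact hxnot ((PySem.Set.mem_ofList _ _).mp hmem)
      have hperm2 : List.Perm (PySem.Set.ofList (x :: t))
          (x :: PySem.Set.ofList (t.filter (fun y => !(y == x)))) := by
        refine (List.perm_ext_iff_of_nodup (PySem.Set.nodup_ofList _) hnodup).mpr ?_
        intro a
        simp only [List.mem_cons, PySem.Set.mem_ofList, List.mem_filter]
        by_cases ha : a = x <;> simp [ha]
      have hcount : ∀ k ∈ PySem.Set.ofList (t.filter (fun y => !(y == x))),
          ((x :: t).count k : Int) * g k = ((t.filter (fun y => !(y == x))).count k : Int) * g k := by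
        intro k hk
        have hk' : k ∈ t.filter (fun y => !(y == x)) := (PySem.Set.mem_ofList _ _).mp hk
        have hkx : k ≠ x := by
          have := (List.mem_filter.mp hk').2
          simpa using this
        rw [List.count_filter]
        · simp [(Ne.symm hkx : x ≠ k)]
        · simp [hkx]
      have hrec : ((t.filter (fun y => !(y == x))).map g).sum
          = ((PySem.Set.ofList (t.filter (fun y => !(y == x)))).map
              (fun k => (((t.filter (fun y => !(y == x))).count k : Int)) * g k)).sum := by
        refine ih (t.filter (fun y => !(y == x))).length ?_ _ rfl
        have := List.length_filter_le (fun y => !(y == x)) t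
        omega
      rw [hLHS, (hperm2.map _).sum_eq]
      simp only [List.map_cons, List.sum_cons, List.count_cons_self]
      rw [List.map_congr_left hcount, ← hrec]

-- per-document agreement of the two inner loops
theorem inner_eq (sentence : List String) (d : PySem.Dict String Int) :
    (sentence.foldl (fun d w => d.insert w (d.getD w 0 + 1))
        PySem.Dict.empty).items.foldl
      (fun s p => if d.contains p.1 then s + p.2 * d.getD p.1 0 else s) 0
    = sentence.foldl (fun s w => if d.contains w then s + d.getD w 0 else s) 0 := by
  rw [PySem.Dict.foldl_insert_getD_add_one_eq_counter, PySem.Dict.items_counter]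
  have h1 := foldl_if_add (fun p : String × Int => d.contains p.1)
    (fun p : String × Int => p.2 * d.getD p.1 0)
    ((PySem.Set.ofList sentence).map (fun k => (k, (sentence.count k : Int)))) 0
  have h2 := foldl_if_add (fun w : String => d.contains w) (fun w : String => d.getD w 0) sentence 0
  rw [h1, h2]
  simp only [List.map_map, zero_add]
  have h3 : ((PySem.Set.ofList sentence).map
        ((fun p : String × Int => if d.contains p.1 then p.2 * d.getD p.1 0 else 0) ∘
          fun k => (k, (sentence.count k : Int))))
      = (PySem.Set.ofList sentence).map
        (fun k => (sentence.count k : Int) * (if d.contains k then d.getD k 0 else 0)) := by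
    apply List.map_congr_left
    intro k _
    by_cases h : d.contains k = true <;> simp [h]
  rw [h3, ← sum_over_set_counts (fun k => if d.contains k then d.getD k 0 else 0) sentence.length sentence rfl]

-- ===== VERDICT (by name: the statement is the Claim_ definition above) =====
theorem word_occurences_spec : Claim_equal_word_occurences := by
  intro sentence corpus _
  unfold Spec_word_occurences word_occurences word_occurences_alt
  rw [PySem.List.foldl_append_singleton_eq_map]
  apply List.map_congr_left
  intro doc_freq _
  simp only
  exact (inner_eq sentence (PySem.Dict.ofList doc_freq)).symm
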